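-- pv_equiv track=rewrite | github.com/daniel-reich/ubiquitous-fiesta | YcqAY72nZNPtvofuJ_8.py | quad_sequence
-- ===== SOURCE A (Python) =====
-- def quad_sequence(lst):
--   #find pattern
--   difference = [lst[len(lst)-2] - lst[len(lst)-3], lst[len(lst)-1] - lst[len(lst)-2]]
--   difference_of_difference = difference[1] - difference[0]
--   #workout
--   last_num = lst[len(lst)-1]
--   last_diff = difference[1]
--   next_nums = []
--   for _ in range(len(lst)):
--     last_diff+=difference_of_difference
--     last_num +=last_diff
--     next_nums.append(last_num)
--   return next_nums
-- ===== SOURCE B (Python) =====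
-- def quad_sequence(lst):
--     last = lst[-1]
--     d1 = lst[-1] - lst[-2]
--     dd = d1 - (lst[-2] - lst[-3])
--     return [last + k * d1 + dd * (k * (k + 1) // 2) for k in range(1, len(lst) + 1)]
-- ===== Notes on version B (the rewrite author's own statement) =====
-- stated objective: simpler
-- what changed: Replaces the step-by-step accumulator loop (running first difference and running value) by a direct closed-form quadratic evaluation last + k*d1 + dd*k*(k+1)//2 at each index k.
-- outside the precondition, e.g. on quad_sequence([1, 2]): A returns [5, 10], B raises IndexError
import Mathlib
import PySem

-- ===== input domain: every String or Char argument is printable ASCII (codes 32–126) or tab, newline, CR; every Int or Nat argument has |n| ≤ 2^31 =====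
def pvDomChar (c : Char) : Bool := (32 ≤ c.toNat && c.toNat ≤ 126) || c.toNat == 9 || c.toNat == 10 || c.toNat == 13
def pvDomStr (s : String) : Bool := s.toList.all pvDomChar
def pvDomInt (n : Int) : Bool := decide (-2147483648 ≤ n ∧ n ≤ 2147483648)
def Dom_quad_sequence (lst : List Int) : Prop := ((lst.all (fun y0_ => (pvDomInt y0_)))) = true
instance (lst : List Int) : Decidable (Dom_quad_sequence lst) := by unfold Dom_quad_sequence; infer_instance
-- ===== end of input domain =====

-- B replaces A's running-accumulator loop by a closed-form quadratic evaluation per index (objective: simpler).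

-- ===== PORT A =====
def quad_sequence (lst : List Int) : List Int :=
  let n : Int := lst.length
  let difference : List Int :=
    [PySem.List.pyGetD lst (n - 2) 0 - PySem.List.pyGetD lst (n - 3) 0,
     PySem.List.pyGetD lst (n - 1) 0 - PySem.List.pyGetD lst (n - 2) 0]
  let difference_of_difference :=
    PySem.List.pyGetD difference 1 0 - PySem.List.pyGetD difference 0 0
  let last_num := PySem.List.pyGetD lst (n - 1) 0
  let last_diff := PySem.List.pyGetD difference 1 0
  ((List.range lst.length).foldl (fun (s : Int × Int × List Int) _ =>
      let ld := s.1 + difference_of_difference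
      let ln := s.2.1 + ld
      (ld, ln, s.2.2 ++ [ln])) (last_diff, last_num, [])).2.2

-- ===== PORT B =====
def quad_sequence_alt (lst : List Int) : List Int :=
  let last := PySem.List.pyGetD lst (-1) 0
  let d1 := PySem.List.pyGetD lst (-1) 0 - PySem.List.pyGetD lst (-2) 0
  let dd := d1 - (PySem.List.pyGetD lst (-2) 0 - PySem.List.pyGetD lst (-3) 0)
  (PySem.List.pyRange 1 ((lst.length : Int) + 1) 1).map
    (fun k => last + k * d1 + dd * PySem.Int.floordiv (k * (k + 1)) 2)

-- ===== PRECONDITION & SPEC =====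
-- Pre_ excludes lists of length < 3: on length below 2 A raises IndexError, and on length 2 A
-- returns a value only through negative-index wraparound of its computed index len-3, where B's
-- natural direct negative indexing of the third element from the end raises IndexError.
def Pre_quad_sequence (lst : List Int) : Prop := 3 ≤ lst.length
instance (lst : List Int) : Decidable (Pre_quad_sequence lst) := by unfold Pre_quad_sequence; infer_instance
def pvWitness_quad_sequence : List Int := [1, 2, 4]

def Spec_quad_sequence (lst : List Int) (out : List Int) : Prop := out = quad_sequence_alt lst
instance (lst : List Int) (out : List Int) : Decidable (Spec_quad_sequence lst out) := by unfold Spec_quad_sequence; infer_instance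

-- ===== CLAIM (what is proved, stated in full; the proofs are below) =====
def Claim_equal_quad_sequence : Prop := ∀ (lst : List Int), Dom_quad_sequence lst → Pre_quad_sequence lst → Spec_quad_sequence lst (quad_sequence lst)

-- ===== LEMMAS AND PROOFS =====

-- triangular numbers, avoiding division in the loop invariant
def pvTri : Nat → Int
  | 0 => 0
  | k + 1 => pvTri k + (k + 1)

theorem pvTri_two_mul (k : Nat) : 2 * pvTri k = (k : Int) * (k + 1) := by
  induction k with
  | zero => simp [pvTri]
  | succ n ih => simp only [pvTri]; push_cast; push_cast at ih; ring_nf; ring_nf at ih; omega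

theorem pvTri_floordiv (k : Nat) :
    PySem.Int.floordiv (((k : Int) + 1) * ((k : Int) + 2)) 2 = pvTri (k + 1) := by
  have h2 : ((k : Int) + 1) * ((k : Int) + 2) = 2 * pvTri (k + 1) := by
    have := pvTri_two_mul (k + 1); push_cast at this; linarith
  rw [h2, PySem.Int.floordiv_eq_ediv_of_pos (by omega), Int.mul_ediv_cancel_left _ (by omega)]

theorem pvLoopA (dd d1 last : Int) (n : Nat) :
    (List.range n).foldl (fun (s : Int × Int × List Int) _ =>
        let ld := s.1 + dd
        let ln := s.2.1 + ld
        (ld, ln, s.2.2 ++ [ln])) (d1, last, []) =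
      (d1 + n * dd, last + n * d1 + dd * pvTri n,
        (List.range n).map (fun k : Nat => last + ((k : Int) + 1) * d1 + dd * pvTri (k + 1))) := by
  induction n with
  | zero => simp [pvTri]
  | succ m ih =>
      rw [List.range_succ, List.foldl_append, ih]
      simp only [List.foldl_cons, List.foldl_nil, List.map_append, List.map_cons, List.map_nil,
        pvTri, Prod.mk.injEq]
      refine ⟨by push_cast; ring, by push_cast; ring, by ring_nf⟩

-- ===== VERDICT (by name: the statement is the Claim_ definition above) =====
theorem quad_sequence_spec : Claim_equal_quad_sequence := by
  intro lst _ hpre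
  unfold Pre_quad_sequence at hpre
  unfold Spec_quad_sequence quad_sequence quad_sequence_alt
  -- resolve the negative indices of B to the same elements A reads
  rw [PySem.List.pyGetD_neg_ofNat lst 1 0 (by omega) (by omega),
      PySem.List.pyGetD_neg_ofNat lst 2 0 (by omega) (by omega),
      PySem.List.pyGetD_neg_ofNat lst 3 0 (by omega) (by omega)]
  -- resolve A's computed indices
  have g1 : PySem.List.pyGetD lst ((lst.length : Int) - 1) 0 = lst[lst.length - 1] := by
    rw [PySem.List.pyGetD_eq_getElem lst 0 (by omega) (by omega)]
    simp only [show ((lst.length : Int) - 1).toNat = lst.length - 1 from by omega]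
  have g2 : PySem.List.pyGetD lst ((lst.length : Int) - 2) 0 = lst[lst.length - 2] := by
    rw [PySem.List.pyGetD_eq_getElem lst 0 (by omega) (by omega)]
    simp only [show ((lst.length : Int) - 2).toNat = lst.length - 2 from by omega]
  have g3 : PySem.List.pyGetD lst ((lst.length : Int) - 3) 0 = lst[lst.length - 3] := by
    rw [PySem.List.pyGetD_eq_getElem lst 0 (by omega) (by omega)]
    simp only [show ((lst.length : Int) - 3).toNat = lst.length - 3 from by omega]
  simp only [g1, g2, g3, PySem.List.pyGetD_zero_cons]
  have gd1 : ∀ a b : Int, PySem.List.pyGetD [a, b] 1 0 = b := by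
    intro a b
    rw [PySem.List.pyGetD_eq_getElem [a, b] 0 (by omega) (by simp)]
    rfl
  simp only [gd1]
  rw [pvLoopA, PySem.List.pyRange_one]
  have hn : ((lst.length : Int) + 1 - 1).toNat = lst.length := by omega
  rw [hn, List.map_map]
  refine List.map_congr_left ?_
  intro k _
  simp only [Function.comp]
  rw [show (1 : Int) + k = (k : Int) + 1 by ring]
  rw [show ((k : Int) + 1) * ((k : Int) + 1 + 1) = ((k : Int) + 1) * ((k : Int) + 2) by ring,
    pvTri_floordiv]
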